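-- pv_equiv track=rewrite | github.com/Cypher30/AI-final-project-GOMOKU | src/abpruning_wine_final/abpruning.py | CountFive
-- ===== SOURCE A (Python) =====
-- Empty = 2
--
-- def CountFive(line, player):
--     """
--     Given line the function return the number of point which could form five in a row
--     """
--     five = 0
--     for i in range(9):
--         if line[i] == Empty:
--             count = 0
--             j = i - 1
--             while j >= 0 and line[j] == player:
--                 count += 1
--                 j -= 1
--             j = i + 1
--             while j <= 8 and line[j] == player:
--                 count += 1
--                 j += 1
--             if count >= 4:
--                 five += 1
--     return five
-- ===== SOURCE B (Python) =====
-- Empty = 2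
--
-- def CountFive(line, player):
--     # run-length tables: left[i] = player stones ending just before i, right[i] = just after i
--     left = [0] * 9
--     for i in range(1, 9):
--         left[i] = left[i - 1] + 1 if line[i - 1] == player else 0
--     right = [0] * 9
--     for i in range(7, -1, -1):
--         right[i] = right[i + 1] + 1 if line[i + 1] == player else 0
--     five = 0
--     for i in range(9):
--         if line[i] == Empty and left[i] + right[i] >= 4:
--             five += 1
--     return five
-- ===== Notes on version B (the rewrite author's own statement) =====
-- stated objective: alternative
-- what changed: Replaces A's per-empty-cell bidirectional while-scans with two precomputed run-length tables (forward and backward DP) combined in one flat pass.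
import Mathlib
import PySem

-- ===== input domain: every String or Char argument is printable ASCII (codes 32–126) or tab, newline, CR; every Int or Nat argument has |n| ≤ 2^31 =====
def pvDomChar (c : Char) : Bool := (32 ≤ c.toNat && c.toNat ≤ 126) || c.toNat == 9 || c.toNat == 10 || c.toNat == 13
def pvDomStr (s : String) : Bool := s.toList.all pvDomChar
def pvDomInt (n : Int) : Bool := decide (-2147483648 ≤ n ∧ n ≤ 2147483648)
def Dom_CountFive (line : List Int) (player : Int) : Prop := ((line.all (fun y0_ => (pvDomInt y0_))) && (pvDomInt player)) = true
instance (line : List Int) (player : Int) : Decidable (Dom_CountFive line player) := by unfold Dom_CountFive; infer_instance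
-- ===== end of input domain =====

-- B replaces A's per-empty-cell bidirectional while-scans with two precomputed
-- run-length tables combined in one flat pass (alternative decomposition, same cost class).

-- ===== PORT A =====
-- the first while loop: j runs downward while j >= 0 and line[j] == player; k = j + 1
def pvDownA (line : List Int) (player : Int) : Nat → Int → Int
  | 0, count => count
  | k+1, count => if line.getD k 0 = player then pvDownA line player k (count+1) else count

-- the second while loop: j runs upward while j <= 8 and line[j] == player; k = 9 - j
def pvUpA (line : List Int) (player : Int) : Nat → Int → Int
  | 0, count => count
  | k+1, count => if line.getD (8-k) 0 = player then pvUpA line player k (count+1) else count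

def CountFive (line : List Int) (player : Int) : Int :=
  (List.range 9).foldl (fun five i =>
    if line.getD i 0 = 2 then
      let count := pvUpA line player (8-i) (pvDownA line player i 0)
      if count ≥ 4 then five + 1 else five
    else five) 0

-- ===== PORT B =====
def CountFive_alt (line : List Int) (player : Int) : Int :=
  -- for i in range(1, 9): left[i] = left[i-1] + 1 if line[i-1] == player else 0
  let left : List Int := (List.range' 1 8).foldl (fun acc i =>
    acc ++ [if line.getD (i-1) 0 = player then acc.getD (i-1) 0 + 1 else 0]) [0]
  -- for i in range(7, -1, -1): right[i] = right[i+1] + 1 if line[i+1] == player else 0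
  let right : List Int := (List.range 8).foldl (fun acc k =>
    (if line.getD (8-k) 0 = player then acc.headD 0 + 1 else 0) :: acc) [0]
  (List.range 9).foldl (fun five i =>
    if line.getD i 0 = 2 ∧ left.getD i 0 + right.getD i 0 ≥ 4 then five + 1 else five) 0

-- ===== PRECONDITION & SPEC =====
-- A (and B) raise IndexError on lines shorter than 9; those inputs are excluded.
def Pre_CountFive (line : List Int) (player : Int) : Prop := 9 ≤ line.length
instance (line : List Int) (player : Int) : Decidable (Pre_CountFive line player) := by unfold Pre_CountFive; infer_instance
def pvWitness_CountFive : List Int × Int := ([2, 1, 1, 1, 1, 2, 0, 0, 2], 1)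

def Spec_CountFive (line : List Int) (player : Int) (out : Int) : Prop := out = CountFive_alt line player
instance (line : List Int) (player : Int) (out : Int) : Decidable (Spec_CountFive line player out) := by unfold Spec_CountFive; infer_instance

-- ===== CLAIM (what is proved, stated in full; the proofs are below) =====
def Claim_equal_CountFive : Prop := ∀ (line : List Int) (player : Int), Dom_CountFive line player → Pre_CountFive line player → Spec_CountFive line player (CountFive line player)

-- ===== LEMMAS AND PROOFS =====

-- left run length: pvL k = consecutive `player` stones ending just before index k
def pvL (line : List Int) (player : Int) : Nat → Int
  | 0 => 0
  | k+1 => if line.getD k 0 = player then pvL line player k + 1 else 0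

-- right run length at index 8-k: pvR k = consecutive `player` stones starting just after index 8-k
def pvR (line : List Int) (player : Int) : Nat → Int
  | 0 => 0
  | k+1 => if line.getD (8-k) 0 = player then pvR line player k + 1 else 0

lemma pvDownA_eq (line : List Int) (player : Int) :
    ∀ (k : Nat) (c : Int), pvDownA line player k c = c + pvL line player k := by
  intro k
  induction k with
  | zero => intro c; simp [pvDownA, pvL]
  | succ k ih =>
    intro c
    simp only [pvDownA, pvL]
    split
    · rw [ih]; ring
    · ring

lemma pvUpA_eq (line : List Int) (player : Int) :
    ∀ (k : Nat) (c : Int), pvUpA line player k c = c + pvR line player k := by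
  intro k
  induction k with
  | zero => intro c; simp [pvUpA, pvR]
  | succ k ih =>
    intro c
    simp only [pvUpA, pvR]
    split
    · rw [ih]; ring
    · ring

lemma leftTab_eq (line : List Int) (player : Int) : ∀ (n : Nat),
    (List.range' 1 n).foldl (fun acc i =>
        acc ++ [if line.getD (i-1) 0 = player then acc.getD (i-1) 0 + 1 else 0]) [0]
      = (List.range (n+1)).map (pvL line player) := by
  intro n
  induction n with
  | zero => simp [pvL]
  | succ n ih =>
    rw [List.range'_concat, List.foldl_append, ih]
    simp only [List.foldl, show 1 + 1 * n = n + 1 by omega, Nat.add_sub_cancel]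
    rw [PySem.List.getD_map_range _ _ _ _ (by omega)]
    simp [List.range_succ, pvL]

lemma rightTab_eq (line : List Int) (player : Int) : ∀ (n : Nat),
    (List.range n).foldl (fun acc k =>
        (if line.getD (8-k) 0 = player then acc.headD 0 + 1 else 0) :: acc) [0]
      = ((List.range (n+1)).map (pvR line player)).reverse := by
  intro n
  induction n with
  | zero => simp [pvR]
  | succ n ih =>
    rw [List.range_succ, List.foldl_append, ih]
    simp [List.range_succ, List.reverse_append, pvR]

lemma getD_rev9 (f : Nat → Int) (i : Nat) (h : i < 9) :
    ((List.range 9).map f).reverse.getD i 0 = f (8-i) := by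
  rw [← List.map_reverse, show (List.range 9).reverse = (List.range 9).map (fun k => 8-k) from by decide,
    List.map_map]
  exact PySem.List.getD_map_range _ _ _ _ h

-- ===== VERDICT (by name: the statement is the Claim_ definition above) =====
theorem CountFive_spec : Claim_equal_CountFive := by
  intro line player _ _
  unfold Spec_CountFive
  simp only [CountFive, CountFive_alt]
  simp only [leftTab_eq line player 8, rightTab_eq line player 8]
  apply PySem.List.foldl_congr_mem
  intro acc x hx
  have hx9 : x < 9 := by simpa [List.mem_range] using hx
  rw [pvDownA_eq, pvUpA_eq, PySem.List.getD_map_range _ _ _ _ hx9, getD_rev9 _ _ hx9]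
  simp only [zero_add]
  by_cases h1 : line.getD x 0 = 2 <;>
    by_cases h2 : pvL line player x + pvR line player (8-x) ≥ 4 <;>
      simp_all
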